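-- pv_equiv track=rewrite | github.com/neumond/word-sum-rebus | equations.py | patternize
-- ===== SOURCE A (Python) =====
-- def patternize(word, skip=' '):
--     used = {}
--     result = []
--     alloc = iter('ABCDEFGHIJ')
--     for s in word:
--         if s not in skip:
--             if s not in used:
--                 used[s] = next(alloc)
--             result.append(used[s])
--         else:
--             result.append(s)
--     return ''.join(result)
-- ===== SOURCE B (Python) =====
-- def patternize(word, skip=' '):
--     letters = 'ABCDEFGHIJ'
--     out = []
--     for s in word:
--         if s in skip:
--             out.append(s)
--         else:
--             j = word.index(s)
--             rank = len({c for c in word[:j] if c not in skip})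
--             out.append(letters[rank])
--     return ''.join(out)
-- ===== Notes on version B (the rewrite author's own statement) =====
-- stated objective: alternative
-- what changed: B is stateless: it keeps no mapping table and no allocation iterator; each output letter is computed directly as letters[rank], where rank = the number of distinct non-skip characters occurring before the character's first occurrence (word.index plus a set comprehension over that prefix).
import Mathlib
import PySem

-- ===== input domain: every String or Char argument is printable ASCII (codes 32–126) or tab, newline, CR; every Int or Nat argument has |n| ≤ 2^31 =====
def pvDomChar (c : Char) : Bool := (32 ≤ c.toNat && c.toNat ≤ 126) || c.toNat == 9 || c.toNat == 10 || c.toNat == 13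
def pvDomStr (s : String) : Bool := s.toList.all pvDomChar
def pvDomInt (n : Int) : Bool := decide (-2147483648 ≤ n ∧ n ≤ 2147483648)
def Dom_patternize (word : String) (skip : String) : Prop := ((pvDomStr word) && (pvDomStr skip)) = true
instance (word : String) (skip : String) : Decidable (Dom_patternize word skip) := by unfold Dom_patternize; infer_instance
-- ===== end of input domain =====

-- B is stateless (no mapping table/iterator): each letter is computed directly from the rank of the char's first occurrence (alternative decomposition, quadratic instead of linear); proved equal to A on Pre_ (≤ 10 distinct non-skip chars; beyond that both Pythons raise).


-- ===== PORT A =====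
-- A's single loop: for each char, if non-skip allocate from the iterator on first sight and
-- append the mapped letter, else append the char itself.  The iterator 'alloc' is the list of
-- letters still unconsumed; next(alloc) is headD/tail (Pre_ excludes exhaustion = StopIteration,
-- so the '?' default is never reached on admitted inputs).
def pvLoopA (skipL : List Char) : List Char → PySem.Dict Char Char → List Char → List Char → List Char
  | [], _, res, _ => res
  | s :: rest, used, res, alloc =>
    if skipL.contains s = false then
      match used.get? s with
      | some v => pvLoopA skipL rest used (res ++ [v]) alloc
      | none =>
        let v := alloc.headD '?'
        pvLoopA skipL rest (used.insert s v) (res ++ [v]) alloc.tail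
    else pvLoopA skipL rest used (res ++ [s]) alloc

def patternize (word : String) (skip : String) : String :=
  String.ofList (pvLoopA skip.toList word.toList PySem.Dict.empty [] ("ABCDEFGHIJ".toList))

-- ===== PORT B =====
-- rank = len({c for c in word[:j] if c not in skip}) with j = word.index(s).
-- At its call sites s is a character of word, so word.index(s) cannot raise ValueError and
-- the 0 default of index? is unreachable.
def pvRankB (wordL skipL : List Char) (s : Char) : Nat :=
  let j := (PySem.List.index? wordL s).getD 0
  (PySem.Set.ofList ((wordL.take j).filter (fun c => !(skipL.contains c)))).length

-- B's loop over word: skip chars pass through; a non-skip char becomes letters[rank]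
-- (letters[rank] raises IndexError on the 11th distinct char; Pre_ excludes that,
-- so the '?' default is never reached on admitted inputs).
def patternize_alt (word : String) (skip : String) : String :=
  String.ofList (word.toList.map (fun s =>
    if skip.toList.contains s then s
    else ("ABCDEFGHIJ".toList).getD (pvRankB word.toList skip.toList s) '?'))

-- ===== PRECONDITION & SPEC =====
-- Pre_ excludes words with more than 10 distinct non-skip characters: there Python A raises
-- StopIteration (iterator exhausted) and Python B raises IndexError; neither returns a value.
def Pre_patternize (word : String) (skip : String) : Prop :=
  ((word.toList.filter (fun c => !(skip.toList.contains c))).dedup).length ≤ 10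
instance (word : String) (skip : String) : Decidable (Pre_patternize word skip) := by
  unfold Pre_patternize; infer_instance
def pvWitness_patternize : String × String := ("hello world", " ")

def Spec_patternize (word : String) (skip : String) (out : String) : Prop := out = patternize_alt word skip
instance (word : String) (skip : String) (out : String) : Decidable (Spec_patternize word skip out) := by unfold Spec_patternize; infer_instance

-- ===== CLAIM (what is proved, stated in full; the proofs are below) =====
def Claim_equal_patternize : Prop := ∀ (word : String) (skip : String), Dom_patternize word skip → Pre_patternize word skip → Spec_patternize word skip (patternize word skip)

-- ===== LEMMAS AND PROOFS =====

-- The per-character value B emits (the body of patternize_alt's map).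
def pvValB (wordL skipL : List Char) (s : Char) : Char :=
  if skipL.contains s then s
  else ("ABCDEFGHIJ".toList).getD (pvRankB wordL skipL s) '?'

theorem pv_headD_drop (l : List Char) (n : Nat) (d : Char) :
    (l.drop n).headD d = l.getD n d := by
  induction l generalizing n with
  | nil => simp
  | cons x xs ih =>
    cases n with
    | zero => simp
    | succ m => exact ih m

-- The rank of a non-skip char not seen in the processed prefix p is the number of
-- distinct non-skip chars of p.
theorem pvRankB_first (skipL p r : List Char) (s : Char) (hp : s ∉ p) :
    pvRankB (p ++ s :: r) skipL s
      = (PySem.Set.ofList (p.filter (fun c => !(skipL.contains c)))).length := by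
  have hidx : PySem.List.index? (p ++ s :: r) s = some p.length :=
    (PySem.List.index?_eq_some_iff _ _ _).mpr ⟨p, r, rfl, rfl, hp⟩
  unfold pvRankB
  rw [hidx]
  simp

-- Main invariant of A's loop: with w = p ++ r, a table mapping exactly the distinct
-- non-skip chars of p to their B-values, and the iterator at letters.drop used.size,
-- A's loop emits exactly B's values for r.
theorem pvLoop_inv (w skipL : List Char) (r p : List Char) (hw : w = p ++ r)
    (used : PySem.Dict Char Char) (res : List Char)
    (hget : ∀ c, used.get? c =
        if c ∈ PySem.Set.ofList (p.filter (fun x => !(skipL.contains x)))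
        then some (pvValB w skipL c) else none)
    (hsize : used.size = (PySem.Set.ofList (p.filter (fun x => !(skipL.contains x)))).length) :
    pvLoopA skipL r used res (("ABCDEFGHIJ".toList).drop used.size)
      = res ++ r.map (pvValB w skipL) := by
  induction r generalizing p used res with
  | nil => simp [pvLoopA]
  | cons s rest ih =>
    by_cases hs : skipL.contains s = true
    · -- skip char: passed through, table untouched
      have hmem : s ∈ skipL := by simpa using hs
      have hval : pvValB w skipL s = s := by simp [pvValB, hmem]
      have hfil0 : (p ++ [s]).filter (fun x => !(skipL.contains x))
          = p.filter (fun x => !(skipL.contains x)) := by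
        simp [List.filter_append, hmem]
      simp only [pvLoopA, hs]
      rw [if_neg (by simp)]
      rw [ih (p ++ [s]) (by simpa using hw) used (res ++ [s])
        (by rw [hfil0]; exact hget) (by rw [hfil0]; exact hsize)]
      simp [hval]
    · have hs' : skipL.contains s = false := by simpa using hs
      have hnm : s ∉ skipL := by simpa using hs'
      have hfil : (p ++ [s]).filter (fun x => !(skipL.contains x))
          = p.filter (fun x => !(skipL.contains x)) ++ [s] := by
        simp [List.filter_append, hnm]
      by_cases hm : s ∈ PySem.Set.ofList (p.filter (fun x => !(skipL.contains x)))
      · -- seen non-skip char: table hit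
        have hg : used.get? s = some (pvValB w skipL s) := by rw [hget s, if_pos hm]
        have hset : PySem.Set.ofList ((p ++ [s]).filter (fun x => !(skipL.contains x)))
            = PySem.Set.ofList (p.filter (fun x => !(skipL.contains x))) := by
          rw [hfil, PySem.Set.ofList_append_singleton, PySem.Set.add_of_mem hm]
        simp only [pvLoopA, hs', hg, if_true]
        rw [ih (p ++ [s]) (by simpa using hw) used (res ++ [pvValB w skipL s])
          (by rw [hset]; exact hget) (by rw [hset]; exact hsize)]
        simp
      · -- new non-skip char: allocate letters[used.size]
        have hg : used.get? s = none := by rw [hget s, if_neg hm]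
        have hsp : s ∉ p := by
          intro hmem
          exact hm (by
            rw [PySem.Set.mem_ofList, List.mem_filter]
            exact ⟨hmem, by simpa using hnm⟩)
        have hrank : pvValB w skipL s
            = (("ABCDEFGHIJ".toList).drop used.size).headD '?' := by
          rw [pv_headD_drop, hsize, pvValB, if_neg (by simpa using hnm), hw,
            pvRankB_first skipL p rest s hsp]
        have hcon : used.contains s = false := by
          rw [PySem.Dict.contains_eq_isSome_get?, hg]; rfl
        have hset : PySem.Set.ofList ((p ++ [s]).filter (fun x => !(skipL.contains x)))
            = PySem.Set.ofList (p.filter (fun x => !(skipL.contains x))) ++ [s] := by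
          rw [hfil, PySem.Set.ofList_append_singleton, PySem.Set.add_of_not_mem hm]
        simp only [pvLoopA, hs', hg]
        have hsize' : (used.insert s ((("ABCDEFGHIJ".toList).drop used.size).headD '?')).size
            = (PySem.Set.ofList ((p ++ [s]).filter (fun x => !(skipL.contains x)))).length := by
          rw [PySem.Dict.size_insert, hcon, hset]
          simp [hsize]
        have htail : (("ABCDEFGHIJ".toList).drop used.size).tail
            = ("ABCDEFGHIJ".toList).drop ((used.insert s ((("ABCDEFGHIJ".toList).drop used.size).headD '?')).size) := by
          rw [hsize', hset, List.tail_drop]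
          simp [hsize]
        rw [if_true, htail]
        rw [ih (p ++ [s]) (by simpa using hw) _ _ ?_ hsize']
        · simp [hrank]
        · intro c
          rw [hset]
          by_cases hcs : c = s
          · subst hcs
            rw [PySem.Dict.get?_insert_self, if_pos (by simp), hrank]
          · rw [PySem.Dict.get?_insert_of_ne _ _ hcs, hget c]
            have : (c ∈ PySem.Set.ofList (p.filter (fun x => !(skipL.contains x))) ++ [s])
                ↔ c ∈ PySem.Set.ofList (p.filter (fun x => !(skipL.contains x))) := by
              simp [hcs]
            simp only [this]

-- ===== VERDICT (by name: the statement is the Claim_ definition above) =====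
theorem patternize_spec : Claim_equal_patternize := by
  intro word skip _ _
  unfold Spec_patternize patternize patternize_alt
  have h := pvLoop_inv word.toList skip.toList word.toList [] rfl PySem.Dict.empty []
    (by intro c; simp [PySem.Dict.get?_empty, PySem.Set.ofList_nil]) (by simp)
  simp only [PySem.Dict.size_empty, List.drop_zero] at h
  rw [h]
  rfl
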